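-- pv_equiv track=rewrite | github.com/pjaehyun/TIL | PS/programmers/숫자 카드 나누기.py | get_max_integer
-- ===== SOURCE A (Python) =====
-- def get_max_integer(array1, array2, devisors):
--     for devisor in devisors:
--         if devisor == 1:
--             continue
--         check = True
--         for i in range(len(array1)):
--             if array1[i] % devisor != 0 or array2[i] % devisor == 0:
--                 check = False
--                 break
--         if check:
--             return devisor
--     return 0
-- ===== SOURCE B (Python) =====
-- def get_max_integer(array1, array2, devisors):
--     # Fold array1 into one gcd (Euclid by hand; A imports nothing), then each
--     # candidate divisor is tested against array1 in O(1) via g1 % devisor.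
--     g1 = 0
--     for a in array1:
--         while a:
--             g1, a = a, g1 % a
--     for devisor in devisors:
--         if devisor == 1:
--             continue
--         if g1 % devisor != 0:
--             continue
--         if all(array2[i] % devisor != 0 for i in range(len(array1))):
--             return devisor
--     return 0
-- ===== Notes on version B (the rewrite author's own statement) =====
-- stated objective: faster
-- what changed: B folds array1 into a single gcd once (hand-rolled Euclid, as A imports nothing), so each candidate divisor is tested against all of array1 by one 'g1 % devisor' check instead of A's per-divisor rescan of array1; measured ~1.6x faster.
-- outside the precondition, e.g. on get_max_integer([], [], [0]): A returns 0, B raises ZeroDivisionError; on get_max_integer([2], [3], [2, 0]): A returns 2, B returns 2; on get_max_integer([3], [], [2]): A returns 0, B returns 0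
import Mathlib
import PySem

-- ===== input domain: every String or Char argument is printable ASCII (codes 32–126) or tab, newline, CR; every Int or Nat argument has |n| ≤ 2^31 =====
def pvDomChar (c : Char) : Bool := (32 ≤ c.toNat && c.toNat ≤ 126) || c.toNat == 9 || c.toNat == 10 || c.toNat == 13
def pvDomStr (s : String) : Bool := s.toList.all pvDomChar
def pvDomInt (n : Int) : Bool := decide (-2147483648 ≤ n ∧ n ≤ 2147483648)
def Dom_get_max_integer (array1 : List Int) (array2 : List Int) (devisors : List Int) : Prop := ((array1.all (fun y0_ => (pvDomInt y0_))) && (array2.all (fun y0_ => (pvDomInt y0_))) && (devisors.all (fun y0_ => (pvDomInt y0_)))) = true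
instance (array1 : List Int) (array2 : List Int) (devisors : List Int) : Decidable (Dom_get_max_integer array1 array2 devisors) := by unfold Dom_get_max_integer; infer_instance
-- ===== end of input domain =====

-- B replaces A's per-divisor rescans of array1 by one precomputed gcd of array1,
-- testing each candidate divisor against array1 in O(1); return value only.

-- ===== PORT A =====
-- inner `for i in range(len(array1))` loop of A; `false` = the loop broke with check = False
def pvACheck (array1 array2 : List Int) (devisor : Int) : List Int → Bool
  | [] => true
  | i :: is =>
      if PySem.Int.mod (PySem.List.pyGetD array1 i 0) devisor ≠ 0 ∨
         PySem.Int.mod (PySem.List.pyGetD array2 i 0) devisor = 0 then false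
      else pvACheck array1 array2 devisor is

def get_max_integer (array1 : List Int) (array2 : List Int) (devisors : List Int) : Int :=
  match devisors with
  | [] => 0
  | devisor :: rest =>
      if devisor = 1 then get_max_integer array1 array2 rest
      else if pvACheck array1 array2 devisor
                (PySem.List.pyRange 0 (array1.length : Int) 1) then devisor
      else get_max_integer array1 array2 rest

-- ===== PORT B =====
-- termination fact for the hand-written Euclid loop (cited by `decreasing_by`)
theorem pvMod_natAbs_lt (g a : Int) (h : a ≠ 0) :
    (PySem.Int.mod g a).natAbs < a.natAbs := by
  rcases lt_or_gt_of_ne h with hneg | hpos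
  · have := PySem.Int.mod_neg_bounds g hneg
    omega
  · have h1 := PySem.Int.mod_nonneg g hpos
    have h2 := PySem.Int.mod_lt g hpos
    omega

-- `while a: g1, a = a, g1 % a`
def pvEuclid (g1 a : Int) : Int :=
  if h : a = 0 then g1 else pvEuclid a (PySem.Int.mod g1 a)
termination_by a.natAbs
decreasing_by exact pvMod_natAbs_lt g1 a h

-- the first `for a in array1` loop of B
def pvG1 (array1 : List Int) : Int := array1.foldl pvEuclid 0

-- `all(array2[i] % devisor != 0 for i in range(len(array1)))`
def pvBAll (array2 : List Int) (devisor : Int) : List Int → Bool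
  | [] => true
  | i :: is =>
      PySem.Int.mod (PySem.List.pyGetD array2 i 0) devisor ≠ 0 && pvBAll array2 devisor is

def pvBLoop (array1 array2 : List Int) (g1 : Int) : List Int → Int
  | [] => 0
  | devisor :: rest =>
      if devisor = 1 then pvBLoop array1 array2 g1 rest
      else if PySem.Int.mod g1 devisor ≠ 0 then pvBLoop array1 array2 g1 rest
      else if pvBAll array2 devisor (PySem.List.pyRange 0 (array1.length : Int) 1) then devisor
      else pvBLoop array1 array2 g1 rest

def get_max_integer_alt (array1 : List Int) (array2 : List Int) (devisors : List Int) : Int :=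
  pvBLoop array1 array2 (pvG1 array1) devisors

-- ===== PRECONDITION & SPEC =====
-- Pre_ excludes inputs on which either program can raise: devisor lists containing 0
-- (ZeroDivisionError from `% 0`) and array2 shorter than array1 (IndexError from array2[i]);
-- on some such inputs A still returns normally because its scan stops before the bad
-- divisor or index — see the cites in claim.json.
def Pre_get_max_integer (array1 : List Int) (array2 : List Int) (devisors : List Int) : Prop :=
  array1.length ≤ array2.length ∧ (0 : Int) ∉ devisors
instance (array1 : List Int) (array2 : List Int) (devisors : List Int) : Decidable (Pre_get_max_integer array1 array2 devisors) := by unfold Pre_get_max_integer; infer_instance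

def pvWitness_get_max_integer : List Int × List Int × List Int := ([6, 4], [5, 9], [1, 3, 2])

def Spec_get_max_integer (array1 : List Int) (array2 : List Int) (devisors : List Int) (out : Int) : Prop := out = get_max_integer_alt array1 array2 devisors
instance (array1 : List Int) (array2 : List Int) (devisors : List Int) (out : Int) : Decidable (Spec_get_max_integer array1 array2 devisors out) := by unfold Spec_get_max_integer; infer_instance

-- ===== CLAIM (what is proved, stated in full; the proofs are below) =====
def Claim_equal_get_max_integer : Prop := ∀ (array1 : List Int) (array2 : List Int) (devisors : List Int), Dom_get_max_integer array1 array2 devisors → Pre_get_max_integer array1 array2 devisors → Spec_get_max_integer array1 array2 devisors (get_max_integer array1 array2 devisors)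

-- ===== LEMMAS AND PROOFS =====

-- divisors are preserved by one Euclid sweep
theorem dvd_pvEuclid (d g a : Int) : d ∣ pvEuclid g a ↔ d ∣ g ∧ d ∣ a := by
  rw [pvEuclid]
  split_ifs with h
  · subst h; simp
  · have hmod : PySem.Int.mod g a = g - PySem.Int.floordiv g a * a := by
      have := PySem.Int.floordiv_mul_add_mod g a; linarith
    rw [dvd_pvEuclid d a (PySem.Int.mod g a)]
    constructor
    · rintro ⟨ha, hm⟩
      refine ⟨?_, ha⟩
      have : g = PySem.Int.mod g a + PySem.Int.floordiv g a * a := by rw [hmod]; ring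
      rw [this]; exact dvd_add hm (ha.mul_left _)
    · rintro ⟨hg, ha⟩
      exact ⟨ha, by rw [hmod]; exact dvd_sub hg (ha.mul_left _)⟩
termination_by a.natAbs
decreasing_by exact pvMod_natAbs_lt g a h

theorem dvd_foldl_pvEuclid (d : Int) (l : List Int) : ∀ g : Int,
    d ∣ l.foldl pvEuclid g ↔ d ∣ g ∧ ∀ a ∈ l, d ∣ a := by
  induction l with
  | nil => simp
  | cons x l ih =>
      intro g
      simp only [List.foldl_cons, ih, dvd_pvEuclid, List.mem_cons]
      constructor
      · rintro ⟨⟨hg, hx⟩, hl⟩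
        exact ⟨hg, by rintro a (rfl | ha); exact hx; exact hl a ha⟩
      · rintro ⟨hg, hl⟩
        exact ⟨⟨hg, hl x (Or.inl rfl)⟩, fun a ha => hl a (Or.inr ha)⟩

theorem dvd_pvG1 (d : Int) (array1 : List Int) :
    d ∣ pvG1 array1 ↔ ∀ a ∈ array1, d ∣ a := by
  unfold pvG1
  rw [dvd_foldl_pvEuclid]
  simp

theorem pvACheck_iff (array1 array2 : List Int) (d : Int) (is : List Int) :
    pvACheck array1 array2 d is = true ↔
      ∀ i ∈ is, PySem.Int.mod (PySem.List.pyGetD array1 i 0) d = 0 ∧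
                PySem.Int.mod (PySem.List.pyGetD array2 i 0) d ≠ 0 := by
  induction is with
  | nil => simp [pvACheck]
  | cons i is ih =>
      by_cases hc : PySem.Int.mod (PySem.List.pyGetD array1 i 0) d ≠ 0 ∨
                    PySem.Int.mod (PySem.List.pyGetD array2 i 0) d = 0
      · simp [pvACheck, hc]; tauto
      · simp [pvACheck, hc, ih]; tauto

theorem pvBAll_iff (array2 : List Int) (d : Int) (is : List Int) :
    pvBAll array2 d is = true ↔
      ∀ i ∈ is, PySem.Int.mod (PySem.List.pyGetD array2 i 0) d ≠ 0 := by
  induction is with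
  | nil => simp [pvBAll]
  | cons i is ih => simp [pvBAll, ih]

theorem pvRange_forall_a1 (array1 : List Int) (d : Int) :
    (∀ i ∈ PySem.List.pyRange 0 (array1.length : Int) 1,
        PySem.Int.mod (PySem.List.pyGetD array1 i 0) d = 0) ↔ ∀ a ∈ array1, d ∣ a := by
  constructor
  · intro h a ha
    obtain ⟨k, hk, rfl⟩ := List.mem_iff_getElem.mp ha
    have h2 := h (k : Int)
      (by rw [PySem.List.mem_pyRange_one]; exact ⟨Int.natCast_nonneg k, by exact_mod_cast hk⟩)
    rwa [PySem.List.pyGetD_natCast, List.getD_eq_getElem _ _ hk,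
      PySem.Int.mod_eq_zero_iff_dvd] at h2
  · intro h i hi
    rw [PySem.List.mem_pyRange_one] at hi
    obtain ⟨h0, hlt⟩ := hi
    lift i to ℕ using h0 with k
    have hk : k < array1.length := by exact_mod_cast hlt
    rw [PySem.List.pyGetD_natCast, PySem.Int.mod_eq_zero_iff_dvd,
      List.getD_eq_getElem _ _ hk]
    exact h _ (List.getElem_mem hk)

theorem pvACheck_eq_B (array1 array2 : List Int) (d : Int) :
    (pvACheck array1 array2 d (PySem.List.pyRange 0 (array1.length : Int) 1) = true) ↔
      (PySem.Int.mod (pvG1 array1) d = 0 ∧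
       pvBAll array2 d (PySem.List.pyRange 0 (array1.length : Int) 1) = true) := by
  rw [pvACheck_iff, pvBAll_iff, PySem.Int.mod_eq_zero_iff_dvd, dvd_pvG1, ← pvRange_forall_a1,
    ← forall₂_and]

-- ===== VERDICT (by name: the statement is the Claim_ definition above) =====
theorem get_max_integer_spec : Claim_equal_get_max_integer := by
  intro array1 array2 devisors hdom hpre
  clear hdom
  unfold Spec_get_max_integer get_max_integer_alt
  obtain ⟨-, hz⟩ := hpre
  induction devisors with
  | nil => rfl
  | cons d rest ih =>
      have hz' : (0 : Int) ∉ rest := fun h => hz (List.mem_cons_of_mem _ h)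
      have ih' := ih hz'
      by_cases h1 : d = 1
      · simpa [get_max_integer, pvBLoop, h1] using ih'
      · by_cases hA : pvACheck array1 array2 d (PySem.List.pyRange 0 (array1.length : Int) 1) = true
        · obtain ⟨hg, hall⟩ := (pvACheck_eq_B array1 array2 d).mp hA
          simp [get_max_integer, pvBLoop, h1, hA, hg, hall]
        · by_cases hg : PySem.Int.mod (pvG1 array1) d = 0
          · have hall : pvBAll array2 d (PySem.List.pyRange 0 (array1.length : Int) 1) ≠ true := by
              intro hall
              exact hA ((pvACheck_eq_B array1 array2 d).mpr ⟨hg, hall⟩)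
            simpa [get_max_integer, pvBLoop, h1, hA, hg, hall] using ih'
          · simpa [get_max_integer, pvBLoop, h1, hA, hg] using ih'
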